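-- pv_equiv track=rewrite | github.com/tnp1122/Bulls-and-Cows | Ball.py | countBall
-- ===== SOURCE A (Python) =====
-- def countBall(correct,user):
--     ball = 0
--     for i in range(4):
--         if(correct[i]==user[i]):
--             continue
--         if user[i] in correct:
--             ball+=1
--     return ball
-- ===== SOURCE B (Python) =====
-- def countBall(correct, user):
--     pool = set(correct)
--     pairs = [(correct[i], user[i]) for i in range(4)]
--     def go(ps):
--         if not ps:
--             return 0
--         c, u = ps[0]
--         return go(ps[1:]) + (1 if u in pool and c != u else 0)
--     return go(pairs)
-- ===== Notes on version B (the rewrite author's own statement) =====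
-- stated objective: alternative
-- what changed: Replaces A's fused loop (per-position strike test plus a linear rescan of correct each iteration) by building a set pool of correct once, materialising the four (correct[i], user[i]) pairs, and counting them with a recursive helper.
import Mathlib
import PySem

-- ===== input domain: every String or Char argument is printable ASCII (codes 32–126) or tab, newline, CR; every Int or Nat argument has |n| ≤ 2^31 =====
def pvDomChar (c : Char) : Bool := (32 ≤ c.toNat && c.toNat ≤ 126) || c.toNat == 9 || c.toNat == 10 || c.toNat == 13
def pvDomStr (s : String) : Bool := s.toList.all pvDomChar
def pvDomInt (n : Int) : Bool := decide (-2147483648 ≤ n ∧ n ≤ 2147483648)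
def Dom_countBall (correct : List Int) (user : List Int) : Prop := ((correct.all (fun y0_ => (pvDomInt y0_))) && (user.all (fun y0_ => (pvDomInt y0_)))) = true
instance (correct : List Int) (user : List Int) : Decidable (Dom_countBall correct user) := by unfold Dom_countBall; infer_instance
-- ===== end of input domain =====

-- ===== PORT A =====
-- B builds the membership pool once as a set, collects the first-four (correct, user)
-- pairs, and counts recursively over that pair list; neither version mutates its arguments.
-- A: one loop over range(4); skip position on a strike, else count membership hits.
def countBall (correct : List Int) (user : List Int) : Int :=
  (PySem.List.pyRange 0 4 1).foldl (fun ball i =>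
    if (PySem.List.pyGet? correct i).getD 0 = (PySem.List.pyGet? user i).getD 0 then ball
    else if (PySem.List.pyGet? user i).getD 0 ∈ correct then ball + 1 else ball) 0

-- ===== PORT B =====
-- B's recursive helper: count pairs (c, u) with u in the pool and c ≠ u.
def cbGo (pool : PySem.Set Int) : List (Int × Int) → Int
  | [] => 0
  | (c, u) :: rest => cbGo pool rest + (if u ∈ pool ∧ c ≠ u then 1 else 0)

-- B: pool = set(correct) built once; pairs = [(correct[i], user[i]) for i in range(4)];
-- then a recursive count over the pair list.
def countBall_alt (correct : List Int) (user : List Int) : Int :=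
  let pool : PySem.Set Int := PySem.Set.ofList correct
  let pairs := (PySem.List.pyRange 0 4 1).map (fun i =>
    ((PySem.List.pyGet? correct i).getD 0, (PySem.List.pyGet? user i).getD 0))
  cbGo pool pairs

-- ===== PRECONDITION & SPEC =====
-- Pre_ excludes exactly the inputs where Python A raises IndexError (a list shorter than 4).
def Pre_countBall (correct : List Int) (user : List Int) : Prop :=
  4 ≤ correct.length ∧ 4 ≤ user.length
instance (correct : List Int) (user : List Int) : Decidable (Pre_countBall correct user) := by
  unfold Pre_countBall; infer_instance
def pvWitness_countBall : List Int × List Int := ([1, 2, 3, 4], [1, 4, 5, 2])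

def Spec_countBall (correct : List Int) (user : List Int) (out : Int) : Prop := out = countBall_alt correct user
instance (correct : List Int) (user : List Int) (out : Int) : Decidable (Spec_countBall correct user out) := by unfold Spec_countBall; infer_instance

-- ===== CLAIM (what is proved, stated in full; the proofs are below) =====
def Claim_equal_countBall : Prop := ∀ (correct : List Int) (user : List Int), Dom_countBall correct user → Pre_countBall correct user → Spec_countBall correct user (countBall correct user)

-- ===== LEMMAS AND PROOFS =====

theorem len4_exists {l : List Int} (h : 4 ≤ l.length) :
    ∃ a b c d t, l = a :: b :: c :: d :: t := by
  match l with
  | a :: b :: c :: d :: t => exact ⟨a, b, c, d, t, rfl⟩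
  | [] | [_] | [_, _] | [_, _, _] => simp at h

theorem get4_0 (a b c d : Int) (t : List Int) :
    PySem.List.pyGet? (a :: b :: c :: d :: t) (0 : Int) = some a := by
  simp [PySem.List.pyGet?, PySem.List.pyIdx?]; rw [if_pos (by omega)]; simp

theorem get4_1 (a b c d : Int) (t : List Int) :
    PySem.List.pyGet? (a :: b :: c :: d :: t) (1 : Int) = some b := by
  simp [PySem.List.pyGet?, PySem.List.pyIdx?]; rw [if_pos (by omega)]; simp

theorem get4_2 (a b c d : Int) (t : List Int) :
    PySem.List.pyGet? (a :: b :: c :: d :: t) (2 : Int) = some c := by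
  simp [PySem.List.pyGet?, PySem.List.pyIdx?]; rw [if_pos (by omega)]; simp

theorem get4_3 (a b c d : Int) (t : List Int) :
    PySem.List.pyGet? (a :: b :: c :: d :: t) (3 : Int) = some d := by
  simp [PySem.List.pyGet?, PySem.List.pyIdx?]; rw [if_pos (by omega)]; simp

-- A's loop body, abstracted over the two tests of one iteration
def pvStep (ball : Int) (P Q : Prop) [Decidable P] [Decidable Q] : Int :=
  if P then ball else if Q then ball + 1 else ball

-- one 0/1 indicator
def pvCnt (P : Prop) [Decidable P] : Int := if P then 1 else 0

theorem pvStep_eq (ball : Int) (P Q : Prop) [Decidable P] [Decidable Q] :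
    pvStep ball P Q = ball + pvCnt (Q ∧ ¬P) := by
  simp only [pvStep, pvCnt]
  split_ifs <;> first | omega | tauto

theorem pvCore (P0 P1 P2 P3 Q0 Q1 Q2 Q3 : Prop)
    [Decidable P0] [Decidable P1] [Decidable P2] [Decidable P3]
    [Decidable Q0] [Decidable Q1] [Decidable Q2] [Decidable Q3] :
    pvStep (pvStep (pvStep (pvStep 0 P0 Q0) P1 Q1) P2 Q2) P3 Q3
      = (((0 : Int) + pvCnt (Q3 ∧ ¬P3)) + pvCnt (Q2 ∧ ¬P2)) + pvCnt (Q1 ∧ ¬P1)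
          + pvCnt (Q0 ∧ ¬P0) := by
  simp only [pvStep_eq]
  ring

-- ===== VERDICT (by name: the statement is the Claim_ definition above) =====
theorem countBall_spec : Claim_equal_countBall := by
  intro correct user _ hpre
  obtain ⟨hc, hu⟩ := hpre
  obtain ⟨a, b, c, d, t, rfl⟩ := len4_exists hc
  obtain ⟨p, q, r, s, w, rfl⟩ := len4_exists hu
  show countBall _ _ = countBall_alt _ _
  simp only [countBall, countBall_alt,
    show PySem.List.pyRange 0 4 1 = [0, 1, 2, 3] from by decide,
    List.foldl, List.map, get4_0, get4_1, get4_2, get4_3, Option.getD_some,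
    cbGo, PySem.Set.mem_ofList]
  have := pvCore (a = p) (b = q) (c = r) (d = s)
    (p ∈ a :: b :: c :: d :: t) (q ∈ a :: b :: c :: d :: t)
    (r ∈ a :: b :: c :: d :: t) (s ∈ a :: b :: c :: d :: t)
  simpa [pvStep, pvCnt] using this
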